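-- pv_equiv track=rewrite | github.com/ElegantEngineer/python-playground | src/distinct_letters_match_count/distinct_letters_match_count.py | distinct_letters_match_count
-- ===== SOURCE A (Python) =====
-- def distinct_letters_match_count(sequence):
--     '''
--         It returns count of the minimum number of letters
--         that could be deleted from a given string to create
--         a new one in which every letter occurs a unique number of times
--     '''
--
--     letter_counter = dict([(k[0], 0) for k in sequence])
--     cnt = 0
--     queue = list()
--
--     for l_c in sequence:
--         letter_counter.update({l_c: letter_counter[l_c] + 1})
--
--     for k in letter_counter:
--         queue.append(letter_counter[k])
--
--     queue = sorted(queue)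
--
--     while len(queue) > 0:
--         frequent = queue.pop()
--
--         if len(queue) == 0:
--             return cnt
--
--         if frequent == queue[-1]:
--             if frequent > 1:
--                 queue.append(frequent - 1)
--             cnt += 1
--         queue = sorted(queue)
--
--     return cnt
-- ===== SOURCE B (Python) =====
-- def distinct_letters_match_count(sequence):
--     '''
--         Minimum number of deletions so that every letter occurs a unique
--         number of times.  One-pass greedy over the counts sorted in
--         DESCENDING order: each count is clamped below the previous kept
--         value ("cap"); whatever the clamp removes is deleted.  No queue,
--         no reinsertion, no re-sorting.
--     '''
--     counts = {}
--     for ch in sequence: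
--         counts[ch] = counts.get(ch, 0) + 1
--
--     deletions = 0
--     cap = len(sequence)          # no count can exceed this
--     for c in sorted(counts.values(), reverse=True):
--         keep = c if c < cap else cap
--         if keep < 0:
--             keep = 0
--         deletions += c - keep
--         cap = keep - 1
--     return deletions
-- ===== Notes on version B (the rewrite author's own statement) =====
-- stated objective: faster
-- what changed: B replaces A's mutable queue with pop/compare/reinsert/re-sort by a single greedy fold: it counts letters in one dict pass, sorts the counts once in descending order, and clamps each count below the previous kept value (a running cap), summing what the clamp removes; there is no queue, no reinsertion and no re-sorting.
import Mathlib
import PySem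

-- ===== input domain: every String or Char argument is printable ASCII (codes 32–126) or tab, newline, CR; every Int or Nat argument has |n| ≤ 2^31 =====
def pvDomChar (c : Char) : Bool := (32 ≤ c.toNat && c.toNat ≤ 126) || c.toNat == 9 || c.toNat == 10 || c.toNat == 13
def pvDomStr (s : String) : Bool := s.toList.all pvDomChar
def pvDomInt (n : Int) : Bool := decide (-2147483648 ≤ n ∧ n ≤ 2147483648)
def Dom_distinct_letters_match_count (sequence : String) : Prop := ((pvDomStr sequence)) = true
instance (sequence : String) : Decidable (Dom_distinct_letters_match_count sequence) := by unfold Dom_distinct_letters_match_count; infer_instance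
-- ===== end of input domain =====

-- B (distinct_letters_match_count_alt) replaces A's pop/compare/reinsert/re-sort queue by a single
-- greedy fold over the counts sorted once in descending order (clamp each count below a running cap).

-- ===== PORT A =====
-- helpers the termination argument of A's while-loop cites (sum/length measure bookkeeping)
theorem pvMeasure_sorted (l : List Int) :
    ((PySem.List.sorted l (fun x => x)).map Int.toNat).sum + (PySem.List.sorted l (fun x => x)).length
      = (l.map Int.toNat).sum + l.length := by
  have hp := PySem.List.sorted_perm l (fun x : Int => x) false
  rw [(hp.map Int.toNat).sum_eq, hp.length_eq]

theorem pvMeasure_append (l : List Int) (v : Int) :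
    ((l ++ [v]).map Int.toNat).sum + (l ++ [v]).length
      = (l.map Int.toNat).sum + l.length + v.toNat + 1 := by
  simp; omega

theorem pvMeasure_dropLast (q : List Int) (h : q ≠ []) :
    (q.map Int.toNat).sum + q.length
      = ((q.dropLast).map Int.toNat).sum + q.dropLast.length + (q.getLast h).toNat + 1 := by
  conv_lhs => rw [← List.dropLast_concat_getLast h]
  rw [pvMeasure_append]

theorem pvLast_eq (q : List Int) (h : q ≠ []) :
    (PySem.List.pyGet? q (-1)).getD 0 = q.getLast h := by
  rw [PySem.List.pyGet?_neg_one, List.getLast?_eq_some_getLast h]; rfl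

-- the while-loop of A: pop the max, compare with the new last, re-sort every iteration
def pvALoop (queue : List Int) (cnt : Int) : Int :=
  if h : 0 < queue.length then
    let frequent : Int := (PySem.List.pyGet? queue (-1)).getD 0   -- queue.pop(): last element ...
    let rest := queue.dropLast                                     -- ... and the remaining list
    if rest.length = 0 then cnt
    else
      if frequent = (PySem.List.pyGet? rest (-1)).getD 0 then
        let rest' := if frequent > 1 then rest ++ [frequent - 1] else rest
        pvALoop (PySem.List.sorted rest' (fun x => x)) (cnt + 1)
      else
        pvALoop (PySem.List.sorted rest (fun x => x)) cnt
  else cnt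
termination_by (queue.map Int.toNat).sum + queue.length
decreasing_by
  all_goals
    have hne : queue ≠ [] := by intro hn; simp [hn] at h
  · rw [pvMeasure_sorted]
    split_ifs with hf
    · rw [pvMeasure_append, pvMeasure_dropLast queue hne, pvLast_eq queue hne] at *
      omega
    · rw [pvMeasure_dropLast queue hne]
      omega
  · rw [pvMeasure_sorted, pvMeasure_dropLast queue hne]
    omega

def distinct_letters_match_count (sequence : String) : Int :=
  -- letter_counter = dict([(k[0], 0) for k in sequence])
  let letter_counter := sequence.toList.foldl (fun d c => d.insert c (0 : Int)) PySem.Dict.empty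
  -- for l_c in sequence: letter_counter.update({l_c: letter_counter[l_c] + 1})
  let letter_counter := sequence.toList.foldl (fun d c => d.insert c (d.getD c 0 + 1)) letter_counter
  -- for k in letter_counter: queue.append(letter_counter[k])
  let queue := letter_counter.keys.foldl (fun q k => q ++ [letter_counter.getD k 0]) []
  let queue := PySem.List.sorted queue (fun x => x)
  pvALoop queue 0

-- ===== PORT B =====
def distinct_letters_match_count_alt (sequence : String) : Int :=
  -- counts = {}; for ch in sequence: counts[ch] = counts.get(ch, 0) + 1
  let counts := sequence.toList.foldl (fun d c => d.insert c (d.getD c 0 + 1)) PySem.Dict.empty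
  -- deletions = 0; cap = len(sequence); for c in sorted(counts.values(), reverse=True): ...
  let st := (PySem.List.sorted counts.values (fun x => x) true).foldl
    (fun (s : Int × Int) c =>
      let keep := if c < s.2 then c else s.2        -- keep = c if c < cap else cap
      let keep := if keep < 0 then 0 else keep      -- if keep < 0: keep = 0
      (s.1 + (c - keep), keep - 1))                 -- deletions += c - keep; cap = keep - 1
    ((0 : Int), PySem.Str.len sequence)
  st.1

-- ===== PRECONDITION & SPEC =====
def Spec_distinct_letters_match_count (sequence : String) (out : Int) : Prop := out = distinct_letters_match_count_alt sequence
instance (sequence : String) (out : Int) : Decidable (Spec_distinct_letters_match_count sequence out) := by unfold Spec_distinct_letters_match_count; infer_instance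

-- ===== CLAIM (what is proved, stated in full; the proofs are below) =====
def Claim_equal_distinct_letters_match_count : Prop := ∀ (sequence : String), Dom_distinct_letters_match_count sequence → Spec_distinct_letters_match_count sequence (distinct_letters_match_count sequence)

-- ===== LEMMAS AND PROOFS =====

-- functional form of B's fold: G l cap = deletions produced by the cap-greedy on the list l
def pvG : List Int → Int → Int
  | [], _ => 0
  | c :: t, cap =>
      let k1 : Int := if c < cap then c else cap
      let keep : Int := if k1 < 0 then 0 else k1
      (c - keep) + pvG t (keep - 1)

theorem pvG_nil (cap : Int) : pvG [] cap = 0 := rfl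

theorem pvG_cons (c cap : Int) (t : List Int) :
    pvG (c :: t) cap = (c - max (min c cap) 0) + pvG t (max (min c cap) 0 - 1) := by
  have h1 : (if c < cap then c else cap) = min c cap := by split_ifs <;> omega
  have h2 : (if min c cap < 0 then (0 : Int) else min c cap) = max (min c cap) 0 := by
    split_ifs <;> omega
  simp only [pvG, h1, h2]

-- B's fold with pair state computes pvG
theorem pvFold_eq_pvG (l : List Int) : ∀ (d cap : Int),
    (l.foldl (fun (s : Int × Int) c =>
        let keep := if c < s.2 then c else s.2
        let keep := if keep < 0 then 0 else keep
        (s.1 + (c - keep), keep - 1)) (d, cap)).1 = d + pvG l cap := by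
  induction l with
  | nil => intro d cap; simp [pvG_nil]
  | cons c t ih =>
      intro d cap
      simp only [List.foldl_cons]
      rw [ih]
      simp only [pvG]
      ring

-- with a non-positive cap the greedy deletes everything
theorem pvG_neg (l : List Int) : ∀ (cap : Int), cap ≤ 0 → pvG l cap = l.sum := by
  induction l with
  | nil => intro cap _; simp [pvG_nil]
  | cons c t ih =>
      intro cap hc
      rw [pvG_cons]
      have h : max (min c cap) 0 = 0 := by omega
      rw [h, ih (0 - 1) (by omega), List.sum_cons]
      ring

theorem pvG_ones0 (k : Nat) : pvG (List.replicate k 1) 0 = (k : Int) := by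
  rw [pvG_neg _ 0 le_rfl, List.sum_replicate]
  simp

theorem pvG_ones1 (k : Nat) (hk : 1 ≤ k) : pvG (List.replicate k 1) 1 = (k : Int) - 1 := by
  obtain ⟨j, rfl⟩ : ∃ j, k = j + 1 := ⟨k - 1, by omega⟩
  rw [List.replicate_succ, pvG_cons]
  have h : max (min (1 : Int) 1) 0 = 1 := by omega
  rw [h]
  simp only [show (1 : Int) - 1 = 0 from rfl]
  rw [pvG_ones0]
  push_cast
  ring

-- ordered insertion into a DESCENDING list (proof-side object describing the reshuffled queue)
def pvDins (v : Int) : List Int → List Int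
  | [] => [v]
  | w :: t => if v < w then w :: pvDins v t else v :: w :: t

theorem pvDins_perm (v : Int) (l : List Int) : (pvDins v l).Perm (v :: l) := by
  induction l with
  | nil => simp [pvDins]
  | cons w t ih =>
      simp only [pvDins]
      split_ifs with h
      · exact (ih.cons w).trans (List.Perm.swap v w t)
      · exact List.Perm.refl _

theorem pvDins_sum (v : Int) (l : List Int) : (pvDins v l).sum = v + l.sum := by
  rw [(pvDins_perm v l).sum_eq, List.sum_cons]

theorem pvDins_pairwise (v : Int) (l : List Int)
    (h : l.Pairwise (fun a b => b ≤ a)) : (pvDins v l).Pairwise (fun a b => b ≤ a) := by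
  induction l with
  | nil => simp [pvDins]
  | cons w t ih =>
      rw [List.pairwise_cons] at h
      simp only [pvDins]
      split_ifs with hvw
      · rw [List.pairwise_cons]
        refine ⟨?_, ih h.2⟩
        intro x hx
        rcases List.mem_cons.mp ((pvDins_perm v t).mem_iff.mp hx) with hx | hx
        · omega
        · exact h.1 x hx
      · rw [List.pairwise_cons]
        refine ⟨?_, by rw [List.pairwise_cons]; exact h⟩
        intro x hx
        rcases List.mem_cons.mp hx with hx | hx
        · omega
        · have := h.1 x hx; omega

-- KEY: inserting v into a descending list bounded by v+1, with cap c ∈ [0, v], costs (v - c)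
-- more than running the greedy on the list alone with cap c - 1
theorem pvKeygen (v : Int) : ∀ (r : List Int), r.Pairwise (fun a b => b ≤ a) →
    (∀ x ∈ r, x ≤ v + 1) → ∀ (cc : Int), 0 ≤ cc → cc ≤ v →
    pvG (pvDins v r) cc = (v - cc) + pvG r (cc - 1) := by
  intro r
  induction r with
  | nil =>
      intro _ _ cc h0 h1
      simp only [pvDins]
      rw [pvG_cons, pvG_nil, pvG_nil]
      omega
  | cons w t ih =>
      intro hp hb cc h0 h1
      rw [List.pairwise_cons] at hp
      have hwb : w ≤ v + 1 := hb w (by simp)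
      simp only [pvDins]
      split_ifs with hvw
      · -- w = v + 1 goes first
        have hw : w = v + 1 := by omega
        rw [pvG_cons]
        have hk : max (min w cc) 0 = cc := by omega
        rw [hk]
        by_cases hc1 : 1 ≤ cc
        · rw [ih hp.2 (fun x hx => hb x (by simp [hx])) (cc - 1) (by omega) (by omega)]
          rw [pvG_cons]
          have hk2 : max (min w (cc - 1)) 0 = cc - 1 := by omega
          rw [hk2]
          set X := pvG t (cc - 1 - 1)
          omega
        · have hcc : cc = 0 := by omega
          subst hcc
          rw [pvG_neg _ (0 - 1) (by omega), pvDins_sum]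
          rw [pvG_cons]
          rw [pvG_neg t (max (min w (0 - 1)) 0 - 1) (by omega)]
          set S := t.sum
          omega
      · -- v goes first
        rw [pvG_cons]
        have hk : max (min v cc) 0 = cc := by omega
        rw [hk]

-- ===== A-side counting lemmas (A's three passes produce Counter(sequence).values) =====

theorem pvZeroInit_getD (l : List Char) (d : PySem.Dict Char Int) (v : Char)
    (h : d.getD v 0 = 0) :
    (l.foldl (fun d c => d.insert c (0 : Int)) d).getD v 0 = 0 := by
  induction l generalizing d with
  | nil => exact h
  | cons c t ih =>
      simp only [List.foldl_cons]
      exact ih _ (by rw [PySem.Dict.getD_insert]; split <;> simp [h])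

theorem pvSet_update_subset {α : Type} [BEq α] [LawfulBEq α] (l : List α) (s : PySem.Set α)
    (h : ∀ x ∈ l, x ∈ s) : PySem.Set.update s l = s := by
  induction l generalizing s with
  | nil => rfl
  | cons c t ih =>
      simp only [PySem.Set.update, List.foldl_cons] at *
      rw [PySem.Set.add_of_mem (h c (by simp))]
      exact ih s (fun x hx => h x (by simp [hx]))

theorem pvCounts_eq (s : List Char) :
    (s.foldl (fun d c => d.insert c (d.getD c 0 + 1))
        (s.foldl (fun d c => d.insert c (0 : Int)) PySem.Dict.empty)).keys.foldl
      (fun q k => q ++ [(s.foldl (fun d c => d.insert c (d.getD c 0 + 1))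
        (s.foldl (fun d c => d.insert c (0 : Int)) PySem.Dict.empty)).getD k 0]) []
    = (s.foldl (fun d c => d.insert c (d.getD c 0 + 1)) PySem.Dict.empty).values := by
  have hcnt := PySem.Dict.foldl_insert_getD_add_one_eq_counter s
  rw [show s.foldl (fun d c => d.insert c (d.getD c 0 + 1)) PySem.Dict.empty
        = PySem.Dict.counter s from hcnt]
  have hrhs : (PySem.Dict.counter s).values
      = (PySem.Set.ofList s).map (fun k => ((s.count k : Int))) := by
    simp only [PySem.Dict.values, PySem.Dict.items_counter, List.map_map]
    rfl
  have hkeys0 : (s.foldl (fun d c => d.insert c (0 : Int)) PySem.Dict.empty).keys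
      = PySem.Set.ofList s := by
    rw [PySem.Dict.keys_foldl_insert]
    simp [PySem.Set.update_nil_left]
  have hkeys2 : (s.foldl (fun d c => d.insert c (d.getD c 0 + 1))
        (s.foldl (fun d c => d.insert c (0 : Int)) PySem.Dict.empty)).keys
      = PySem.Set.ofList s := by
    rw [PySem.Dict.keys_foldl_insert s _ _, hkeys0]
    exact pvSet_update_subset s _ (fun x hx => (PySem.Set.mem_ofList s x).2 hx)
  have hval : ∀ k, (s.foldl (fun d c => d.insert c (d.getD c 0 + 1))
        (s.foldl (fun d c => d.insert c (0 : Int)) PySem.Dict.empty)).getD k 0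
      = (s.count k : Int) := by
    intro k
    rw [PySem.Dict.getD_foldl_insert_add_one,
      pvZeroInit_getD s PySem.Dict.empty k (by simp [PySem.Dict.getD_empty])]
    ring
  rw [PySem.List.foldl_append_singleton_eq_map, hkeys2, hrhs]
  simp only [List.nil_append]
  exact List.map_congr_left (fun k _ => hval k)

-- in an ascending list the last element is maximal
theorem pvLe_getLast : ∀ (l : List Int), l.Pairwise (· ≤ ·) → ∀ (hne : l ≠ []) (a : Int),
    a ∈ l → a ≤ l.getLast hne := by
  intro l
  induction l with
  | nil => intro _ h; simp at h
  | cons w t ih =>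
      intro hp hne a ha
      rw [List.pairwise_cons] at hp
      by_cases ht : t = []
      · subst ht
        simp at ha
        simp [ha]
      · rw [List.getLast_cons ht]
        rcases List.mem_cons.mp ha with rfl | ha
        · exact hp.1 _ (List.getLast_mem ht)
        · exact ih hp.2 ht a ha

-- ===== MAIN: A's whittling loop computes the cap-greedy on the reversed (descending) queue =====

theorem pvMain (n : Nat) : ∀ (q : List Int) (c cap : Int),
    (q.map Int.toNat).sum + q.length ≤ n → q.Pairwise (· ≤ ·) →
    (∀ x ∈ q, 1 ≤ x ∧ x ≤ cap) →
    pvALoop q c = c + pvG q.reverse cap := by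
  induction n with
  | zero =>
      intro q c cap hn _ _
      have hq : q = [] := List.length_eq_zero_iff.mp (by omega)
      subst hq
      rw [pvALoop]
      simp [pvG_nil]
  | succ n ih =>
      intro q c cap hn hp hm
      rw [pvALoop]
      by_cases hq : 0 < q.length
      case neg =>
        rw [dif_neg hq]
        have hq0 : q = [] := List.length_eq_zero_iff.mp (by omega)
        subst hq0
        simp [pvG_nil]
      rw [dif_pos hq]
      have hne : q ≠ [] := by intro h0; simp [h0] at hq
      set L : Int := q.getLast hne with hLdef
      have hf : (PySem.List.pyGet? q (-1)).getD 0 = L := by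
        rw [hLdef]; exact pvLast_eq q hne
      have hLm := hm L (List.getLast_mem hne)
      have hrev : q.reverse = L :: q.dropLast.reverse := by
        rw [hLdef]
        conv_lhs => rw [← List.dropLast_concat_getLast hne]
        simp
      have hG : pvG q.reverse cap = pvG q.dropLast.reverse (L - 1) := by
        rw [hrev, pvG_cons]
        have hk : max (min L cap) 0 = L := by omega
        rw [hk]
        ring
      by_cases hr : q.dropLast.length = 0
      case pos =>
        rw [if_pos hr]
        have : q.dropLast = [] := List.length_eq_zero_iff.mp hr
        rw [hG, this]
        simp [pvG_nil]
      rw [if_neg hr]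
      have hrne : q.dropLast ≠ [] := by intro h0; simp [h0] at hr
      set rest := q.dropLast with hrest
      have hg : (PySem.List.pyGet? rest (-1)).getD 0 = rest.getLast hrne := pvLast_eq rest hrne
      have hrp : rest.Pairwise (· ≤ ·) := hp.sublist (List.dropLast_sublist q)
      have hrm : ∀ x ∈ rest, 1 ≤ x ∧ x ≤ cap :=
        fun x hx => hm x ((List.dropLast_sublist q).mem hx)
      -- every element of rest is ≤ rest.getLast, and rest.getLast ≤ L
      have hgmax : ∀ x ∈ rest, x ≤ rest.getLast hrne :=
        fun x hx => pvLe_getLast rest hrp hrne x hx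
      have hgL : rest.getLast hrne ≤ L := by
        rw [hLdef]
        exact pvLe_getLast q hp hne _ ((List.dropLast_sublist q).mem (List.getLast_mem hrne))
      have hmu : (q.map Int.toNat).sum + q.length
          = ((rest).map Int.toNat).sum + rest.length + L.toNat + 1 :=
        pvMeasure_dropLast q hne
      by_cases htie : (PySem.List.pyGet? q (-1)).getD 0 = (PySem.List.pyGet? rest (-1)).getD 0
      case neg =>
        rw [if_neg htie]
        rw [PySem.List.sorted_eq_self_of_pairwise rest (fun y => y) hrp]
        have hgL' : rest.getLast hrne < L := by
          rw [hf, hg] at htie; omega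
        rw [hG]
        exact ih rest c (L - 1) (by omega) hrp
          (fun x hx => ⟨(hrm x hx).1, by have := hgmax x hx; omega⟩)
      rw [if_pos htie]
      rw [hf, hg] at htie
      by_cases hf1 : (PySem.List.pyGet? q (-1)).getD 0 > 1
      case neg =>
        -- L = 1: every element of q is 1
        rw [if_neg hf1]
        rw [hf] at hf1
        have hL1 : L = 1 := by omega
        have hall1 : ∀ x ∈ rest, x = 1 := by
          intro x hx
          have h1 := (hrm x hx).1
          have h2 := hgmax x hx
          omega
        have hrepl : rest = List.replicate rest.length (1 : Int) :=
          List.eq_replicate_iff.mpr ⟨rfl, hall1⟩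
        show pvALoop (PySem.List.sorted rest fun x => x) (c + 1) = c + pvG q.reverse cap
        rw [PySem.List.sorted_eq_self_of_pairwise rest (fun y => y) hrp]
        rw [ih rest (c + 1) 1 (by omega) hrp (fun x hx => by have := hall1 x hx; omega)]
        rw [hG]
        conv_lhs => rw [hrepl]
        conv_rhs => rw [hrepl]
        rw [List.reverse_replicate]
        rw [pvG_ones1 rest.length (by omega), hL1]
        rw [show (1 : Int) - 1 = 0 from rfl, pvG_ones0]
        ring
      -- the interesting case: L = rest.getLast > 1; A re-sorts rest ++ [L-1]
      rw [if_pos hf1]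
      rw [hf] at hf1
      rw [hf]
      show pvALoop (PySem.List.sorted (rest ++ [L - 1]) fun x => x) (c + 1)
        = c + pvG q.reverse cap
      have hrLne : rest.getLast hrne = L := htie.symm
      set r' : List Int := rest.dropLast.reverse with hr'def
      have hrestrev : rest.reverse = L :: r' := by
        rw [hr'def]
        conv_lhs => rw [← List.dropLast_concat_getLast hrne]
        rw [List.reverse_append, hrLne]
        rfl
      have hr'p : r'.Pairwise (fun a b => b ≤ a) := by
        rw [hr'def, List.pairwise_reverse]
        exact hrp.sublist (List.dropLast_sublist rest)
      have hr'mem : ∀ x ∈ r', x ∈ rest := by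
        intro x hx
        rw [hr'def, List.mem_reverse] at hx
        exact (List.dropLast_sublist rest).mem hx
      have hr'le : ∀ x ∈ r', x ≤ L := by
        intro x hx
        have := hgmax x (hr'mem x hx)
        omega
      -- the re-sorted queue is the reverse of L :: dins (L-1) r'
      set ys : List Int := L :: pvDins (L - 1) r' with hysdef
      have hperm : ys.reverse.Perm (rest ++ [L - 1]) := by
        have p1 : ys.reverse.Perm ys := List.reverse_perm ys
        have p2 : ys.Perm (L :: (L - 1) :: rest.dropLast) := by
          refine List.Perm.cons L ?_
          refine (pvDins_perm (L - 1) r').trans (List.Perm.cons (L - 1) ?_)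
          exact List.reverse_perm _
        have p3 : (rest ++ [L - 1]).Perm ((L - 1) :: rest) := List.perm_append_singleton _ _
        have p4 : ((L - 1) :: rest).Perm ((L - 1) :: L :: rest.dropLast) := by
          refine List.Perm.cons (L - 1) ?_
          conv_lhs => rw [← List.dropLast_concat_getLast hrne, hrLne]
          exact List.perm_append_singleton _ _
        have p5 : ((L - 1) :: L :: rest.dropLast).Perm (L :: (L - 1) :: rest.dropLast) :=
          List.Perm.swap L (L - 1) rest.dropLast
        exact p1.trans (p2.trans (p3.trans (p4.trans p5)).symm)
      have hyp : ys.Pairwise (fun a b => b ≤ a) := by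
        rw [hysdef, List.pairwise_cons]
        refine ⟨?_, pvDins_pairwise _ _ hr'p⟩
        intro x hx
        rcases List.mem_cons.mp ((pvDins_perm (L - 1) r').mem_iff.mp hx) with hx | hx
        · omega
        · exact hr'le x hx
      have hypw : ys.reverse.Pairwise (· ≤ ·) := by
        rw [List.pairwise_reverse]
        exact hyp
      have hq' : PySem.List.sorted (rest ++ [L - 1]) (fun x => x) = ys.reverse :=
        PySem.List.sorted_id_eq_of_perm_of_pairwise _ _ hperm hypw
      rw [hq']
      -- measure of ys.reverse
      have hmu2 : ((ys.reverse).map Int.toNat).sum + ys.reverse.length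
          = ((rest ++ [L - 1]).map Int.toNat).sum + (rest ++ [L - 1]).length := by
        rw [(hperm.map Int.toNat).sum_eq, hperm.length_eq]
      have hmu3 := pvMeasure_append rest (L - 1)
      have hymem : ∀ x ∈ ys.reverse, 1 ≤ x ∧ x ≤ cap := by
        intro x hx
        rw [List.mem_reverse, hysdef] at hx
        rcases List.mem_cons.mp hx with hx | hx
        · omega
        · rcases List.mem_cons.mp ((pvDins_perm (L - 1) r').mem_iff.mp hx) with hx | hx
          · omega
          · exact hrm x (hr'mem x hx)
      rw [ih ys.reverse (c + 1) cap (by omega) hypw hymem]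
      rw [List.reverse_reverse, hysdef, pvG_cons]
      have hk1 : max (min L cap) 0 = L := by omega
      rw [hk1]
      rw [pvKeygen (L - 1) r' hr'p (fun x hx => by have := hr'le x hx; omega)
        (L - 1) (by omega) le_rfl]
      rw [hG, hrestrev, pvG_cons]
      have hk2 : max (min L (L - 1)) 0 = L - 1 := by omega
      rw [hk2]
      set X := pvG r' (L - 1 - 1)
      omega

-- elements of counter values are between 1 and the length of the string
theorem pvValues_bounds (s : List Char) (x : Int)
    (hx : x ∈ (PySem.Dict.counter s).values) : 1 ≤ x ∧ x ≤ (s.length : Int) := by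
  have hrhs : (PySem.Dict.counter s).values
      = (PySem.Set.ofList s).map (fun k => ((s.count k : Int))) := by
    simp only [PySem.Dict.values, PySem.Dict.items_counter, List.map_map]
    rfl
  rw [hrhs, List.mem_map] at hx
  obtain ⟨k, hk, rfl⟩ := hx
  have hks : k ∈ s := (PySem.Set.mem_ofList s k).1 hk
  have h1 : 0 < s.count k := List.count_pos_iff.mpr hks
  have h2 : s.count k ≤ s.length := List.count_le_length
  constructor <;> omega

-- the descending sort IS the reverse of the ascending sort (both descending permutations of vals)
theorem pvSortedRev (vals : List Int) :
    PySem.List.sorted vals (fun x => x) true = (PySem.List.sorted vals (fun x => x)).reverse := by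
  apply List.Perm.eq_of_pairwise (le := fun a b : Int => b ≤ a)
  · intro a b _ _ h1 h2
    omega
  · exact PySem.List.sorted_pairwise_rev vals (fun x => x)
  · rw [List.pairwise_reverse]
    exact PySem.List.sorted_pairwise vals (fun x => x)
  · exact (PySem.List.sorted_perm vals (fun x : Int => x) true).trans
      (((List.reverse_perm _).trans (PySem.List.sorted_perm vals (fun x : Int => x) false)).symm)

-- ===== VERDICT (by name: the statement is the Claim_ definition above) =====
theorem distinct_letters_match_count_spec : Claim_equal_distinct_letters_match_count := by
  intro s _
  unfold Spec_distinct_letters_match_count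
  simp only [distinct_letters_match_count, distinct_letters_match_count_alt]
  rw [pvCounts_eq s.toList]
  rw [show s.toList.foldl (fun d c => d.insert c (d.getD c 0 + 1)) PySem.Dict.empty
        = PySem.Dict.counter s.toList from PySem.Dict.foldl_insert_getD_add_one_eq_counter s.toList]
  set vals := (PySem.Dict.counter s.toList).values with hvals
  rw [pvFold_eq_pvG, pvSortedRev]
  have hpw := PySem.List.sorted_pairwise vals (fun x : Int => x)
  have hmem : ∀ x ∈ PySem.List.sorted vals (fun x : Int => x), 1 ≤ x ∧ x ≤ PySem.Str.len s := by
    intro x hx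
    rw [PySem.List.mem_sorted] at hx
    have := pvValues_bounds s.toList x hx
    rw [PySem.Str.len_eq]
    exact this
  rw [pvMain (((PySem.List.sorted vals (fun x : Int => x)).map Int.toNat).sum
      + (PySem.List.sorted vals (fun x : Int => x)).length)
    (PySem.List.sorted vals (fun x : Int => x)) 0 (PySem.Str.len s) le_rfl hpw hmem]
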